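-- pv_equiv track=rewrite | github.com/CS21B043/TicTacToe-MinMax | TTT.py | column_check_S
-- ===== SOURCE A (Python) =====
-- p1_symbol = 'X'
--
-- p2_symbol = 'O'
--
-- def column_check_S(state):
--     n = len(state)
--     #COLUMN CHECK
--     diff = 0
--     for i in range(n):
--         p1_count = 0
--         p2_count = 0
--         for j in range(n):
--             p1_count+=state[j][i]==p1_symbol
--             p2_count+=state[j][i]==p2_symbol
--         if(abs(p1_count-p2_count) > abs(diff)):
--             diff = p1_count - p2_count
--         if abs(diff)==(n):
--             return diff
--     return diff
-- ===== SOURCE B (Python) =====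
-- p1_symbol = 'X'
--
-- p2_symbol = 'O'
--
-- def column_check_S(state):
--     n = len(state)
--     diffs = [0] * n
--     for row in state:
--         diffs = [d + (row[i] == p1_symbol) - (row[i] == p2_symbol)
--                  for i, d in enumerate(diffs)]
--     best = 0
--     for d in diffs:
--         if abs(d) > abs(best):
--             best = d
--     return best
-- ===== Notes on version B (the rewrite author's own statement) =====
-- stated objective: alternative
-- what changed: Replaces A's column-major nested scan with fused max-tracking and early exit by a row-major single pass that maintains a vector of per-column signed differences, followed by a separate max-by-abs reduction. Pre_ excludes ragged states (a row shorter than len(state)), on which A either raises IndexError or returns via its early exit while B's row scan raises IndexError.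
-- outside the precondition, e.g. on column_check_S([['X'], ['X']]): A returns 2, B raises IndexError
import Mathlib
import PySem

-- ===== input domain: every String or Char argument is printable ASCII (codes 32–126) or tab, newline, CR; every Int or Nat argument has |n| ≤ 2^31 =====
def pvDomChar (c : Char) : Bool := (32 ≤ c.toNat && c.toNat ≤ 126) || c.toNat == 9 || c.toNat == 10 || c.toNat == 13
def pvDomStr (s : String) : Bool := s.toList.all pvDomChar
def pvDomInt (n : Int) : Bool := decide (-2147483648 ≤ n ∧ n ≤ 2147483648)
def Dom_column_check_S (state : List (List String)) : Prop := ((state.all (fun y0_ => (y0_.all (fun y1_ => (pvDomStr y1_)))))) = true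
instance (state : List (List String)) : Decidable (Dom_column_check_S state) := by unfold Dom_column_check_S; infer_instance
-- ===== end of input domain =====

-- B traverses row-major in one pass, maintaining a vector of per-column signed differences,
-- then reduces it with a separate max-by-abs pass, instead of A's column-major nested scan
-- with fused max-tracking and early exit: different traversal, same cost.


-- ===== PORT A =====
-- inner loop: for j in range(n): p1_count += state[j][i]=='X'; p2_count += state[j][i]=='O'
-- (j iterates over exactly the rows of state; lookup exact under Pre_)
def ccCounts (state : List (List String)) (i : Nat) : Int × Int :=
  state.foldl (fun (pc : Int × Int) row =>
      (pc.1 + (if (PySem.List.pyGet? row (i : Int)).getD "" == "X" then 1 else 0),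
       pc.2 + (if (PySem.List.pyGet? row (i : Int)).getD "" == "O" then 1 else 0)))
    (0, 0)

-- outer loop over i in range(n), with the early return when abs(diff) == n
def ccOuter (state : List (List String)) (n : Nat) : List Nat → Int → Int
  | [], diff => diff
  | i :: rest, diff =>
    let pc := ccCounts state i
    let d := if |pc.1 - pc.2| > |diff| then pc.1 - pc.2 else diff
    if |d| = (n : Int) then d else ccOuter state n rest d

def column_check_S (state : List (List String)) : Int :=
  ccOuter state state.length (List.range state.length) 0

-- ===== PORT B =====
-- diffs = [d + (row[i]=='X') - (row[i]=='O') for i, d in enumerate(diffs)]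
def ccUpdRow (row : List String) (ds : List Int) : List Int :=
  ds.mapIdx (fun i d =>
    d + (if (PySem.List.pyGet? row (i : Int)).getD "" == "X" then 1 else 0)
      - (if (PySem.List.pyGet? row (i : Int)).getD "" == "O" then 1 else 0))

-- best = 0; for d in diffs: if abs(d) > abs(best): best = d
def ccPick (ds : List Int) : Int :=
  ds.foldl (fun best d => if |d| > |best| then d else best) 0

def column_check_S_alt (state : List (List String)) : Int :=
  ccPick (state.foldl (fun ds row => ccUpdRow row ds) (List.replicate state.length 0))

-- ===== PRECONDITION & SPEC =====
-- Pre_ excludes ragged states (a row shorter than len(state)): there A either raises IndexError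
-- or returns only via its early exit, while B's row scan raises IndexError.
def Pre_column_check_S (state : List (List String)) : Prop :=
  ∀ row ∈ state, state.length ≤ row.length
instance (state : List (List String)) : Decidable (Pre_column_check_S state) := by
  unfold Pre_column_check_S; infer_instance
def pvWitness_column_check_S : List (List String) := [["X", "O"], ["X", "X"]]

def Spec_column_check_S (state : List (List String)) (out : Int) : Prop := out = column_check_S_alt state
instance (state : List (List String)) (out : Int) : Decidable (Spec_column_check_S state out) := by unfold Spec_column_check_S; infer_instance

-- ===== CLAIM (what is proved, stated in full; the proofs are below) =====
def Claim_equal_column_check_S : Prop := ∀ (state : List (List String)), Dom_column_check_S state → Pre_column_check_S state → Spec_column_check_S state (column_check_S state)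

-- ===== LEMMAS AND PROOFS =====

-- the per-column signed difference (what column i of A's counts amounts to)
def ccDiff (state : List (List String)) (i : Nat) : Int :=
  state.foldl (fun (d : Int) row =>
      d + (if (PySem.List.pyGet? row (i : Int)).getD "" == "X" then 1 else 0)
        - (if (PySem.List.pyGet? row (i : Int)).getD "" == "O" then 1 else 0))
    0

-- the pair of counts determines the signed difference
theorem ccCounts_sub (state : List (List String)) (i : Nat) :
    (ccCounts state i).1 - (ccCounts state i).2 = ccDiff state i := by
  unfold ccCounts ccDiff
  suffices h : ∀ (l : List (List String)) (a b : Int),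
      (l.foldl (fun (pc : Int × Int) row =>
          (pc.1 + (if (PySem.List.pyGet? row (i : Int)).getD "" == "X" then 1 else 0),
           pc.2 + (if (PySem.List.pyGet? row (i : Int)).getD "" == "O" then 1 else 0))) (a, b)).1
       - (l.foldl (fun (pc : Int × Int) row =>
          (pc.1 + (if (PySem.List.pyGet? row (i : Int)).getD "" == "X" then 1 else 0),
           pc.2 + (if (PySem.List.pyGet? row (i : Int)).getD "" == "O" then 1 else 0))) (a, b)).2
       = l.foldl (fun (d : Int) row =>
          d + (if (PySem.List.pyGet? row (i : Int)).getD "" == "X" then 1 else 0)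
            - (if (PySem.List.pyGet? row (i : Int)).getD "" == "O" then 1 else 0)) (a - b) by
    simpa using h state 0 0
  intro l
  induction l with
  | nil => intro a b; simp
  | cons r t ih =>
      intro a b
      simp only [List.foldl_cons]
      rw [ih]
      ring_nf

-- the column difference is bounded by the number of rows
theorem ccDiff_foldl_bound (i : Nat) (l : List (List String)) :
    ∀ (a : Int),
      |l.foldl (fun (d : Int) row =>
          d + (if (PySem.List.pyGet? row (i : Int)).getD "" == "X" then 1 else 0)
            - (if (PySem.List.pyGet? row (i : Int)).getD "" == "O" then 1 else 0)) a|
        ≤ |a| + (l.length : Int) := by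
  induction l with
  | nil => intro a; simp
  | cons r t ih =>
      intro a
      simp only [List.foldl_cons, List.length_cons]
      refine le_trans (ih _) ?_
      have hx2 : (if (PySem.List.pyGet? r (i : Int)).getD "" == "X" then (1:Int) else 0) ≤ 1 := by
        split <;> omega
      have hx1 : (0 : Int) ≤ (if (PySem.List.pyGet? r (i : Int)).getD "" == "X" then 1 else 0) := by
        split <;> omega
      have hy2 : (if (PySem.List.pyGet? r (i : Int)).getD "" == "O" then (1:Int) else 0) ≤ 1 := by
        split <;> omega
      have hy1 : (0 : Int) ≤ (if (PySem.List.pyGet? r (i : Int)).getD "" == "O" then 1 else 0) := by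
        split <;> omega
      have ha1 := neg_abs_le a
      have ha2 := le_abs_self a
      have habs : |a + (if (PySem.List.pyGet? r (i : Int)).getD "" == "X" then (1:Int) else 0)
          - (if (PySem.List.pyGet? r (i : Int)).getD "" == "O" then (1:Int) else 0)| ≤ |a| + 1 := by
        rw [abs_le]; constructor <;> omega
      push_cast
      omega

theorem ccDiff_abs_le (state : List (List String)) (i : Nat) :
    |ccDiff state i| ≤ (state.length : Int) := by
  unfold ccDiff
  simpa using ccDiff_foldl_bound i state 0

-- A's outer loop, early exit removed, is a plain foldl of the max-by-abs step over the diffs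
theorem ccOuter_eq_foldl (state : List (List String)) (l : List Nat) (d : Int) :
    ccOuter state state.length l d
      = l.foldl (fun m i => if |ccDiff state i| > |m| then ccDiff state i else m) d := by
  induction l generalizing d with
  | nil => rfl
  | cons i rest ih =>
      show (let pc := ccCounts state i
            let d' := if |pc.1 - pc.2| > |d| then pc.1 - pc.2 else d
            if |d'| = (state.length : Int) then d' else ccOuter state state.length rest d') = _
      simp only [ccCounts_sub, List.foldl_cons]
      set d' := if |ccDiff state i| > |d| then ccDiff state i else d with hd'
      by_cases h : |d'| = (state.length : Int)
      · rw [if_pos h]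
        have hkeep : ∀ (t : List Nat),
            t.foldl (fun m i => if |ccDiff state i| > |m| then ccDiff state i else m) d' = d' := by
          intro t
          induction t with
          | nil => rfl
          | cons j tt iht =>
              simp only [List.foldl_cons]
              have hle := ccDiff_abs_le state j
              have hng : ¬ |ccDiff state j| > |d'| := by rw [h]; omega
              rw [if_neg hng, iht]
        exact (hkeep rest).symm
      · rw [if_neg h]; exact ih d'

-- B's row-major fold preserves the vector length
theorem ccFold_length (l : List (List String)) :
    ∀ (ds : List Int), (l.foldl (fun ds row => ccUpdRow row ds) ds).length = ds.length := by
  induction l with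
  | nil => intro ds; rfl
  | cons r t ih =>
      intro ds
      simp only [List.foldl_cons]
      rw [ih]
      simp [ccUpdRow]

-- entry i of B's row-major fold is the column-major fold over the rows starting at ds[i]
theorem ccFold_getElem (l : List (List String)) :
    ∀ (ds : List Int) (i : Nat) (hi : i < ds.length)
      (hi' : i < (l.foldl (fun ds row => ccUpdRow row ds) ds).length),
      (l.foldl (fun ds row => ccUpdRow row ds) ds)[i]'hi'
        = l.foldl (fun (d : Int) row =>
            d + (if (PySem.List.pyGet? row (i : Int)).getD "" == "X" then 1 else 0)
              - (if (PySem.List.pyGet? row (i : Int)).getD "" == "O" then 1 else 0)) (ds[i]'hi) := by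
  induction l with
  | nil => intro ds i hi hi'; rfl
  | cons r t ih =>
      intro ds i hi hi'
      simp only [List.foldl_cons] at hi' ⊢
      have hlen : i < (ccUpdRow r ds).length := by simpa [ccUpdRow] using hi
      rw [ih (ccUpdRow r ds) i hlen hi']
      congr 1
      simp [ccUpdRow]

-- the vector B builds is exactly the list of per-column differences
theorem ccFold_eq_map (state : List (List String)) :
    state.foldl (fun ds row => ccUpdRow row ds) (List.replicate state.length 0)
      = (List.range state.length).map (ccDiff state) := by
  apply List.ext_getElem
  · rw [ccFold_length]; simp
  · intro i hi₁ hi₂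
    have hi : i < (List.replicate state.length (0 : Int)).length := by
      rw [ccFold_length] at hi₁; simpa using hi₁
    rw [ccFold_getElem state _ i hi hi₁]
    have hn : i < state.length := by simpa using hi
    simp [ccDiff, List.getElem_replicate]

-- ===== VERDICT (by name: the statement is the Claim_ definition above) =====
theorem column_check_S_spec : Claim_equal_column_check_S := by
  intro state _ _
  unfold Spec_column_check_S column_check_S column_check_S_alt
  rw [ccOuter_eq_foldl, ccFold_eq_map]
  unfold ccPick
  rw [List.foldl_map]
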